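-- pv_equiv track=rewrite | github.com/qiuni-cdc/s3-redshift-backup-tool | src/cli/airflow_integration.py | determine_exit_code
-- ===== SOURCE A (Python) =====
-- from typing import Dict, List, Any, Optional, Tuple
--
-- class AirflowExitCodes:
--     """Enhanced exit codes for Airflow task integration"""
--     SUCCESS = 0
--     CONFIGURATION_ERROR = 1
--     CONNECTION_ERROR = 2
--     PARTIAL_SUCCESS = 3
--     DATA_ERROR = 4
--     S3_ERROR = 5
--     REDSHIFT_ERROR = 6
--
-- def determine_exit_code(overall_status: str, table_results: Dict[str, Any]) -> int:
--     """Determine appropriate exit code based on execution results"""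
--
--     if overall_status == "success":
--         return AirflowExitCodes.SUCCESS
--     elif overall_status == "partial_success":
--         return AirflowExitCodes.PARTIAL_SUCCESS
--     else:
--         # Analyze failure types to determine specific exit code
--         error_messages = [
--             result.get("error_message", "").lower()
--             for result in table_results.values()
--             if result.get("status") == "failed"
--         ]
--
--         if any("connection" in msg for msg in error_messages):
--             return AirflowExitCodes.CONNECTION_ERROR
--         elif any("s3" in msg for msg in error_messages):
--             return AirflowExitCodes.S3_ERROR
--         elif any("redshift" in msg or "copy" in msg for msg in error_messages):
--             return AirflowExitCodes.REDSHIFT_ERROR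
--         elif any("config" in msg or "validation" in msg for msg in error_messages):
--             return AirflowExitCodes.CONFIGURATION_ERROR
--         else:
--             return AirflowExitCodes.DATA_ERROR
-- ===== SOURCE B (Python) =====
-- class AirflowExitCodes:
--     SUCCESS = 0
--     CONFIGURATION_ERROR = 1
--     CONNECTION_ERROR = 2
--     PARTIAL_SUCCESS = 3
--     DATA_ERROR = 4
--     S3_ERROR = 5
--     REDSHIFT_ERROR = 6
--
-- def determine_exit_code(overall_status, table_results):
--     """Determine appropriate exit code based on execution results (single pass)."""
--     if overall_status == "success":
--         return AirflowExitCodes.SUCCESS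
--     if overall_status == "partial_success":
--         return AirflowExitCodes.PARTIAL_SUCCESS
--     conn = s3 = redshift = config = False
--     for result in table_results.values():
--         if result.get("status") == "failed":
--             msg = result.get("error_message", "").lower()
--             conn = conn or "connection" in msg
--             s3 = s3 or "s3" in msg
--             redshift = redshift or "redshift" in msg or "copy" in msg
--             config = config or "config" in msg or "validation" in msg
--     if conn:
--         return AirflowExitCodes.CONNECTION_ERROR
--     if s3:
--         return AirflowExitCodes.S3_ERROR
--     if redshift:
--         return AirflowExitCodes.REDSHIFT_ERROR
--     if config:
--         return AirflowExitCodes.CONFIGURATION_ERROR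
--     return AirflowExitCodes.DATA_ERROR
-- ===== Notes on version B (the rewrite author's own statement) =====
-- stated objective: alternative
-- what changed: Replaced A's intermediate lowered-message list plus five separate any() scans by a single pass over table_results.values() that accumulates four boolean flags, followed by a priority-ordered flag test.
import Mathlib
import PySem

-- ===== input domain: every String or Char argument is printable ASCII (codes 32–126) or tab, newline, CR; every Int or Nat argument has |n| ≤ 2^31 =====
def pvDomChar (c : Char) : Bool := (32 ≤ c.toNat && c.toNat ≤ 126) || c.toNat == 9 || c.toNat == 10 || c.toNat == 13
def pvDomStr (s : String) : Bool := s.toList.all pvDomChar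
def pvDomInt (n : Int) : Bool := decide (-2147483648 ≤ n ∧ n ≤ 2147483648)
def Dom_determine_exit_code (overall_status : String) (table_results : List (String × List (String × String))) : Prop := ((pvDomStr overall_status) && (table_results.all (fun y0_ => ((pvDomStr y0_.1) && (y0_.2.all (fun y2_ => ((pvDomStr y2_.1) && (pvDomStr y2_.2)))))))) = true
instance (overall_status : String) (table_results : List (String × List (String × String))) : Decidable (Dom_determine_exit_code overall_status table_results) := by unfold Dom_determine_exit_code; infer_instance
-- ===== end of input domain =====

-- B replaces A's list comprehension plus five separate any-scans by one pass over the
-- table results that accumulates four boolean flags, then picks the code by priority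
-- (objective: alternative/simpler decomposition; same cost).

-- shared helper: Python dict.get on an association list (first match)
def pvGet (r : List (String × String)) (k : String) : Option String :=
  match r with
  | [] => none
  | (k', v) :: rest => if k' = k then some v else pvGet rest k

-- ===== PORT A =====
def determine_exit_code (overall_status : String) (table_results : List (String × List (String × String))) : Int :=
  if overall_status = "success" then 0
  else if overall_status = "partial_success" then 3
  else
    let error_messages :=
      ((table_results.map Prod.snd).filter
        (fun r => pvGet r "status" == some "failed")).map
        (fun r => PySem.Str.lower ((pvGet r "error_message").getD ""))
    if error_messages.any (fun m => PySem.Str.isIn "connection" m) then 2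
    else if error_messages.any (fun m => PySem.Str.isIn "s3" m) then 5
    else if error_messages.any
        (fun m => PySem.Str.isIn "redshift" m || PySem.Str.isIn "copy" m) then 6
    else if error_messages.any
        (fun m => PySem.Str.isIn "config" m || PySem.Str.isIn "validation" m) then 1
    else 4

-- ===== PORT B =====
def determine_exit_code_alt (overall_status : String) (table_results : List (String × List (String × String))) : Int :=
  if overall_status = "success" then 0
  else if overall_status = "partial_success" then 3
  else
    let flags := (table_results.map Prod.snd).foldl
      (fun (f : Bool × Bool × Bool × Bool) r =>
        if pvGet r "status" == some "failed" then
          let m := PySem.Str.lower ((pvGet r "error_message").getD "")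
          (f.1 || PySem.Str.isIn "connection" m,
           f.2.1 || PySem.Str.isIn "s3" m,
           f.2.2.1 || PySem.Str.isIn "redshift" m || PySem.Str.isIn "copy" m,
           f.2.2.2 || PySem.Str.isIn "config" m || PySem.Str.isIn "validation" m)
        else f)
      (false, false, false, false)
    if flags.1 then 2
    else if flags.2.1 then 5
    else if flags.2.2.1 then 6
    else if flags.2.2.2 then 1
    else 4

-- ===== PRECONDITION & SPEC =====
def Spec_determine_exit_code (overall_status : String) (table_results : List (String × List (String × String))) (out : Int) : Prop := out = determine_exit_code_alt overall_status table_results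
instance (overall_status : String) (table_results : List (String × List (String × String))) (out : Int) : Decidable (Spec_determine_exit_code overall_status table_results out) := by unfold Spec_determine_exit_code; infer_instance

-- ===== CLAIM (what is proved, stated in full; the proofs are below) =====
def Claim_equal_determine_exit_code : Prop := ∀ (overall_status : String) (table_results : List (String × List (String × String))), Dom_determine_exit_code overall_status table_results → Spec_determine_exit_code overall_status table_results (determine_exit_code overall_status table_results)

-- ===== LEMMAS AND PROOFS =====

-- the failed-rows messages of a list of results
def pvMsgs (rs : List (List (String × String))) : List String :=
  (rs.filter (fun r => pvGet r "status" == some "failed")).map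
    (fun r => PySem.Str.lower ((pvGet r "error_message").getD ""))

-- B's fold computes the four any-scans of A, for any starting flags
theorem pvFold_eq (rs : List (List (String × String))) (f : Bool × Bool × Bool × Bool) :
    rs.foldl
      (fun (f : Bool × Bool × Bool × Bool) r =>
        if pvGet r "status" == some "failed" then
          let m := PySem.Str.lower ((pvGet r "error_message").getD "")
          (f.1 || PySem.Str.isIn "connection" m,
           f.2.1 || PySem.Str.isIn "s3" m,
           f.2.2.1 || PySem.Str.isIn "redshift" m || PySem.Str.isIn "copy" m,
           f.2.2.2 || PySem.Str.isIn "config" m || PySem.Str.isIn "validation" m)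
        else f)
      f
    = (f.1 || (pvMsgs rs).any (fun m => PySem.Str.isIn "connection" m),
       f.2.1 || (pvMsgs rs).any (fun m => PySem.Str.isIn "s3" m),
       f.2.2.1 || (pvMsgs rs).any
         (fun m => PySem.Str.isIn "redshift" m || PySem.Str.isIn "copy" m),
       f.2.2.2 || (pvMsgs rs).any
         (fun m => PySem.Str.isIn "config" m || PySem.Str.isIn "validation" m)) := by
  induction rs generalizing f with
  | nil => simp [pvMsgs]
  | cons r rest ih =>
    rw [List.foldl_cons]
    by_cases h : pvGet r "status" == some "failed"
    · rw [if_pos h, ih]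
      simp [pvMsgs, h, Bool.or_assoc]
    · rw [if_neg h, ih]
      simp [pvMsgs, h]

-- ===== VERDICT (by name: the statement is the Claim_ definition above) =====
theorem determine_exit_code_spec : Claim_equal_determine_exit_code := by
  intro os tr _
  unfold Spec_determine_exit_code determine_exit_code determine_exit_code_alt
  by_cases h1 : os = "success"
  · simp [h1]
  · by_cases h2 : os = "partial_success"
    · simp [h2]
    · simp only [if_neg h1, if_neg h2, pvFold_eq (tr.map Prod.snd) (false, false, false, false)]
      simp only [pvMsgs, Bool.false_or]
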